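-- pv_equiv track=rewrite | github.com/marcohm08/knapsack | algoritmo_genetico.py | cruzamiento
-- ===== SOURCE A (Python) =====
-- def cruzamiento(conjunto):
--     punto = int(len(conjunto[0]) / 2)
--     listaMitades = []
--     nuevasSoluciones = []
--     for sol in conjunto:
--         mitades = []
--         parte1 = sol[:punto]
--         parte2 = sol[punto:]
--         mitades.append(parte1)
--         mitades.append(parte2)
--         listaMitades.append(mitades)
--
--     sol1 = listaMitades[0][0] + listaMitades[1][1]
--     sol2 = listaMitades[0][1] + listaMitades[1][0]
--     nuevasSoluciones.append(sol1)
--     nuevasSoluciones.append(sol2)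
--
--     return nuevasSoluciones
-- ===== SOURCE B (Python) =====
-- def cruzamiento(conjunto):
--     a, b = conjunto[0], conjunto[1]
--     punto = int(len(a) / 2)
--     hijo1, hijo2 = [], []
--     for i, x in enumerate(a):
--         (hijo1 if i < punto else hijo2).append(x)
--     for i, x in enumerate(b):
--         (hijo2 if i < punto else hijo1).append(x)
--     return [hijo1, hijo2]
-- ===== Notes on version B (the rewrite author's own statement) =====
-- stated objective: alternative
-- what changed: Replaces A's slice-and-table construction (precompute halves of every solution, then concatenate four table entries) by a single-pass routing loop: each element of the two parents is appended to one of the two growing children according to whether its index is below the crossover point; no slicing and no listaMitades table at all.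
import Mathlib
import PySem

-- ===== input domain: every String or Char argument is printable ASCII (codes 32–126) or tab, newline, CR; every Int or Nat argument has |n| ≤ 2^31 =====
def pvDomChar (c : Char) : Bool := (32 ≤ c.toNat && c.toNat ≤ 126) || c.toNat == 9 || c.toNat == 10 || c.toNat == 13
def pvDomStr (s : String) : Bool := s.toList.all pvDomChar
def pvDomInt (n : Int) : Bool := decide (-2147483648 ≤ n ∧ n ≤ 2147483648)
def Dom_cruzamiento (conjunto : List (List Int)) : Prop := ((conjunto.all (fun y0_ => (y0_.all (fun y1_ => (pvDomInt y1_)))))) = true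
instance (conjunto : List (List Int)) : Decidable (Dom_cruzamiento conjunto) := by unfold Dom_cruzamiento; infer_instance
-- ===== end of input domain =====

-- B replaces A's slice-and-table construction by a single-pass routing loop that appends
-- each element of the two parents to one of two accumulating children (objective: alternative).


-- ===== PORT A =====
def cruzamiento (conjunto : List (List Int)) : List (List Int) :=
  let punto : Int := (((PySem.List.pyGet? conjunto 0).getD []).length : Int) / 2
  let listaMitades : List (List (List Int)) :=
    conjunto.map (fun sol =>
      [PySem.List.slice sol none (some punto), PySem.List.slice sol (some punto) none])
  let m0 := (PySem.List.pyGet? listaMitades 0).getD []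
  let m1 := (PySem.List.pyGet? listaMitades 1).getD []
  let sol1 := (PySem.List.pyGet? m0 0).getD [] ++ (PySem.List.pyGet? m1 1).getD []
  let sol2 := (PySem.List.pyGet? m0 1).getD [] ++ (PySem.List.pyGet? m1 0).getD []
  [sol1, sol2]

-- ===== PORT B =====
-- routing step: element x with index i goes to the first child iff i < punto
def cruzAltStep (punto : Int) (st : List Int × List Int) (ix : Int × Int) :
    List Int × List Int :=
  if ix.1 < punto then (st.1 ++ [ix.2], st.2) else (st.1, st.2 ++ [ix.2])

def cruzamiento_alt (conjunto : List (List Int)) : List (List Int) :=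
  let a := (PySem.List.pyGet? conjunto 0).getD []
  let b := (PySem.List.pyGet? conjunto 1).getD []
  let punto : Int := (a.length : Int) / 2
  let st1 := (PySem.List.enumerate a 0).foldl (cruzAltStep punto) ([], [])
  let st2 := (PySem.List.enumerate b 0).foldl
    (fun st ix => let st' := cruzAltStep punto (st.2, st.1) ix; (st'.2, st'.1)) st1
  [st2.1, st2.2]

-- ===== PRECONDITION & SPEC =====
-- Pre_ excludes exactly the inputs with fewer than two solutions, where the Python A
-- raises IndexError (conjunto[0] or listaMitades[1]); B raises there too (conjunto[1]).
def Pre_cruzamiento (conjunto : List (List Int)) : Prop := 2 ≤ conjunto.length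
instance (conjunto : List (List Int)) : Decidable (Pre_cruzamiento conjunto) := by unfold Pre_cruzamiento; infer_instance
def pvWitness_cruzamiento : List (List Int) := [[1, 2, 3, 4], [5, 6, 7, 8]]
def Spec_cruzamiento (conjunto : List (List Int)) (out : List (List Int)) : Prop := out = cruzamiento_alt conjunto
instance (conjunto : List (List Int)) (out : List (List Int)) : Decidable (Spec_cruzamiento conjunto out) := by unfold Spec_cruzamiento; infer_instance

-- ===== CLAIM (what is proved, stated in full; the proofs are below) =====
def Claim_equal_cruzamiento : Prop := ∀ (conjunto : List (List Int)), Dom_cruzamiento conjunto → Pre_cruzamiento conjunto → Spec_cruzamiento conjunto (cruzamiento conjunto)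

-- ===== LEMMAS AND PROOFS =====

-- the routing fold splits the enumerated list at index punto: the part below punto is
-- appended to the first accumulator, the rest to the second
theorem cruzAlt_fold (punto : Int) (xs : List Int) :
    ∀ (s : Int) (c1 c2 : List Int),
      (PySem.List.enumerate xs s).foldl (cruzAltStep punto) (c1, c2)
        = (c1 ++ xs.take (punto - s).toNat, c2 ++ xs.drop (punto - s).toNat) := by
  induction xs with
  | nil => intro s c1 c2; simp [PySem.List.enumerate_nil]
  | cons x xs ih =>
    intro s c1 c2
    rw [PySem.List.enumerate_cons]
    simp only [List.foldl_cons]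
    by_cases h : s < punto
    · have hpos : (punto - s).toNat = (punto - (s + 1)).toNat + 1 := by omega
      rw [show cruzAltStep punto (c1, c2) (s, x) = (c1 ++ [x], c2) by
        simp [cruzAltStep, h]]
      rw [ih (s + 1) (c1 ++ [x]) c2, hpos]
      simp [List.take_succ_cons, List.drop_succ_cons]
    · have h0 : (punto - s).toNat = 0 := by omega
      have h1 : (punto - (s + 1)).toNat = 0 := by omega
      rw [show cruzAltStep punto (c1, c2) (s, x) = (c1, c2 ++ [x]) by
        simp [cruzAltStep, h]]
      rw [ih (s + 1) c1 (c2 ++ [x]), h0, h1]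
      simp

-- the second fold is the first one with the accumulators swapped
theorem cruzAlt_fold_swap (punto : Int) (xs : List Int) (s : Int) (c1 c2 : List Int) :
    (PySem.List.enumerate xs s).foldl
        (fun st ix => let st' := cruzAltStep punto (st.2, st.1) ix; (st'.2, st'.1)) (c1, c2)
      = (c1 ++ xs.drop (punto - s).toNat, c2 ++ xs.take (punto - s).toNat) := by
  have key : ∀ (l : List (Int × Int)) (d1 d2 : List Int),
      l.foldl (fun st ix => let st' := cruzAltStep punto (st.2, st.1) ix; (st'.2, st'.1)) (d1, d2)
        = ((l.foldl (cruzAltStep punto) (d2, d1)).2, (l.foldl (cruzAltStep punto) (d2, d1)).1) := by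
    intro l
    induction l with
    | nil => intro d1 d2; simp
    | cons p l ih =>
      intro d1 d2
      simp only [List.foldl_cons]
      rw [ih]
  rw [key, cruzAlt_fold]

-- ===== VERDICT (by name: the statement is the Claim_ definition above) =====
theorem cruzamiento_spec : Claim_equal_cruzamiento := by
  intro conjunto _ hpre
  unfold Spec_cruzamiento
  match conjunto with
  | a :: b :: rest =>
    have hp : (0 : Int) ≤ (a.length : Int) / 2 := by positivity
    simp only [cruzamiento, cruzamiento_alt]
    rw [cruzAlt_fold, cruzAlt_fold_swap]
    simp [PySem.List.pyGet?_zero_cons,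
      PySem.List.slice_to _ hp, PySem.List.slice_from _ hp]
  | [] => simp [Pre_cruzamiento] at hpre
  | [x] => simp [Pre_cruzamiento] at hpre
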